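-- pv_equiv track=rewrite | github.com/justin-gutierrez/llmcontext | llmcontext/core/embeddings.py | _extract_chunks_from_markdown
-- ===== SOURCE A (Python) =====
-- from typing import Dict, List, Optional, Union, Any, Tuple
--
-- def _extract_chunks_from_markdown(content: str) -> List[str]:
--     """
--     Extract chunk content from markdown file.
--
--     Args:
--         content: Markdown content
--
--     Returns:
--         List of chunk contents
--     """
--     chunks = []
--
--     # Split by chunk headers
--     lines = content.split('\n')
--     current_chunk = []
--     in_chunk = False
--
--     for line in lines:
--         if line.startswith('### Chunk'):
--             if current_chunk and in_chunk:
--                 chunks.append('\n'.join(current_chunk).strip())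
--             current_chunk = []
--             in_chunk = True
--             continue
--
--         if in_chunk and line.strip():
--             current_chunk.append(line)
--
--     # Add the last chunk
--     if current_chunk and in_chunk:
--         chunks.append('\n'.join(current_chunk).strip())
--
--     return chunks
-- ===== SOURCE B (Python) =====
-- def _extract_chunks_from_markdown(content: str):
--     """Group lines into sections first, then map over the groups (no streaming flags)."""
--     sections = [[]]
--     for line in content.split('\n'):
--         if line.startswith('### Chunk'):
--             sections.append([])
--         else:
--             sections[-1].append(line)
--     chunks = []
--     for sec in sections[1:]:
--         filtered = [l for l in sec if l.strip()]
--         if filtered: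
--             chunks.append('\n'.join(filtered).strip())
--     return chunks
-- ===== Notes on version B (the rewrite author's own statement) =====
-- stated objective: simpler
-- what changed: Replaces the streaming in_chunk/current_chunk flag machine with a two-pass decomposition: first group the lines into header-delimited sections (discarding the pre-header segment by slicing), then map each section through filter-blank/join/strip.
import Mathlib
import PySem

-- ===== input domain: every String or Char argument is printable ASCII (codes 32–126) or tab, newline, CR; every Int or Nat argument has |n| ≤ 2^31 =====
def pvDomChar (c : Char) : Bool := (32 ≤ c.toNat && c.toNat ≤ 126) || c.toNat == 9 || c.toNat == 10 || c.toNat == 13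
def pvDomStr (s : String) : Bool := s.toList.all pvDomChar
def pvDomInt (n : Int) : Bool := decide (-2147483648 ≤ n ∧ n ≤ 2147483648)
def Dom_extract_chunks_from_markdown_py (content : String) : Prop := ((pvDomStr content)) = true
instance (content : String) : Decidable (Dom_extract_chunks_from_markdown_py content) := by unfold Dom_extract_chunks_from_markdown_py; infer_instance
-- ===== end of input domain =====

-- B replaces A's streaming in_chunk/current_chunk flag machine by a two-pass decomposition:
-- group lines into header-delimited sections first, then map filter/join/strip over the groups (objective: simpler).

-- ===== PORT A =====
-- loop body; state: (chunks, current_chunk, in_chunk)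
def pyAStep (st : List String × List String × Bool) (line : String) :
    List String × List String × Bool :=
  if PySem.Str.startswith line "### Chunk" then
    (if st.2.1 ≠ [] ∧ st.2.2 = true then st.1 ++ [PySem.Str.strip (PySem.Str.join "\n" st.2.1)]
     else st.1,
     [], true)
  else if st.2.2 = true ∧ PySem.Str.strip line ≠ "" then (st.1, st.2.1 ++ [line], st.2.2)
  else st

-- the final 'add the last chunk' flush
def pyAFin (st : List String × List String × Bool) : List String :=
  if st.2.1 ≠ [] ∧ st.2.2 = true then st.1 ++ [PySem.Str.strip (PySem.Str.join "\n" st.2.1)]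
  else st.1

def extract_chunks_from_markdown_py (content : String) : List String :=
  let lines := (PySem.Str.split? content "\n").getD []   -- sep "\n" ≠ "", so split? is never none
  pyAFin (lines.foldl pyAStep ([], [], false))

-- ===== PORT B =====
-- loop body: 'sections.append([])' / 'sections[-1].append(line)'
def pyBStep (secs : List (List String)) (line : String) : List (List String) :=
  if PySem.Str.startswith line "### Chunk" then secs ++ [[]]
  else secs.dropLast ++ [(secs.getLast?.getD []) ++ [line]]

def extract_chunks_from_markdown_py_alt (content : String) : List String :=
  let lines := (PySem.Str.split? content "\n").getD []   -- sep "\n" ≠ "", so split? is never none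
  let sections := lines.foldl pyBStep [[]]
  (sections.drop 1).foldl
    (fun chunks sec =>
      let filtered := sec.filter (fun l => decide (PySem.Str.strip l ≠ ""))
      if filtered ≠ [] then chunks ++ [PySem.Str.strip (PySem.Str.join "\n" filtered)] else chunks)
    []

-- ===== PRECONDITION & SPEC =====
def Spec_extract_chunks_from_markdown_py (content : String) (out : List String) : Prop := out = extract_chunks_from_markdown_py_alt content
instance (content : String) (out : List String) : Decidable (Spec_extract_chunks_from_markdown_py content out) := by unfold Spec_extract_chunks_from_markdown_py; infer_instance

-- ===== CLAIM (what is proved, stated in full; the proofs are below) =====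
def Claim_equal_extract_chunks_from_markdown_py : Prop := ∀ (content : String), Dom_extract_chunks_from_markdown_py content → Spec_extract_chunks_from_markdown_py content (extract_chunks_from_markdown_py content)

-- ===== LEMMAS AND PROOFS =====

-- what one section contributes to B's output
def pvEmit (sec : List String) : List String :=
  let filtered := sec.filter (fun l => decide (PySem.Str.strip l ≠ ""))
  if filtered ≠ [] then [PySem.Str.strip (PySem.Str.join "\n" filtered)] else []

-- the section grouping B's fold computes, as a structural recursion
def pvGather (cur : List String) : List String → List (List String)
  | [] => [cur]
  | l :: ls =>
    if PySem.Str.startswith l "### Chunk" then cur :: pvGather [] ls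
    else pvGather (cur ++ [l]) ls

-- the remaining output A produces from state (cur, inc), as a structural recursion
def pvTailA (cur : List String) (inc : Bool) : List String → List String
  | [] => if cur ≠ [] ∧ inc = true then [PySem.Str.strip (PySem.Str.join "\n" cur)] else []
  | l :: ls =>
    if PySem.Str.startswith l "### Chunk" then
      (if cur ≠ [] ∧ inc = true then [PySem.Str.strip (PySem.Str.join "\n" cur)] else []) ++
        pvTailA [] true ls
    else if inc = true ∧ PySem.Str.strip l ≠ "" then pvTailA (cur ++ [l]) inc ls
    else pvTailA cur inc ls

theorem pvB_fold (ls : List String) : ∀ (secs : List (List String)) (cur : List String),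
    ls.foldl pyBStep (secs ++ [cur]) = secs ++ pvGather cur ls := by
  induction ls with
  | nil => intro secs cur; simp [pvGather]
  | cons l ls ih =>
    intro secs cur
    rw [List.foldl_cons, pvGather]
    by_cases h : PySem.Str.startswith l "### Chunk"
    · rw [if_pos h]
      simp only [pyBStep, if_pos h]
      rw [List.append_assoc secs [cur] [[]],
        show ([cur] ++ [[]] : List (List String)) = [cur] ++ [([] : List String)] from rfl,
        ← List.append_assoc, ih (secs ++ [cur]) [], List.append_assoc]
      rfl
    · rw [if_neg h]
      simp only [pyBStep, if_neg h, List.dropLast_concat, List.getLast?_concat, Option.getD_some]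
      exact ih secs (cur ++ [l])

theorem pvA_fold (ls : List String) : ∀ (chunks cur : List String) (inc : Bool),
    pyAFin (ls.foldl pyAStep (chunks, cur, inc)) = chunks ++ pvTailA cur inc ls := by
  induction ls with
  | nil =>
    intro chunks cur inc
    rw [List.foldl_nil, pyAFin, pvTailA]
    split <;> simp
  | cons l ls ih =>
    intro chunks cur inc
    rw [List.foldl_cons, pvTailA]
    by_cases h : PySem.Str.startswith l "### Chunk"
    · rw [if_pos h]
      simp only [pyAStep, if_pos h]
      rw [ih _ [] true]
      split <;> simp
    · rw [if_neg h]
      by_cases h2 : inc = true ∧ PySem.Str.strip l ≠ ""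
      · rw [if_pos h2]
        simp only [pyAStep, if_neg h, if_pos h2]
        exact ih chunks (cur ++ [l]) inc
      · rw [if_neg h2]
        simp only [pyAStep, if_neg h, if_neg h2]
        exact ih chunks cur inc

theorem pvMain (ls : List String) : ∀ (cur : List String),
    pvTailA (cur.filter (fun l => decide (PySem.Str.strip l ≠ ""))) true ls =
      (pvGather cur ls).flatMap pvEmit := by
  induction ls with
  | nil =>
    intro cur
    simp only [pvGather, pvTailA, List.flatMap_cons, List.flatMap_nil, List.append_nil, pvEmit]
    split <;> split <;> simp_all
  | cons l ls ih =>
    intro cur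
    by_cases h : PySem.Str.startswith l "### Chunk"
    · rw [pvTailA, if_pos h, pvGather, if_pos h, List.flatMap_cons]
      have := ih []
      simp only [List.filter_nil] at this
      rw [this, pvEmit]
      congr 1
      split <;> split <;> simp_all
    · rw [pvTailA, if_neg h, pvGather, if_neg h]
      by_cases h2 : PySem.Str.strip l ≠ ""
      · rw [if_pos ⟨rfl, h2⟩]
        have hf : (cur ++ [l]).filter (fun l => decide (PySem.Str.strip l ≠ "")) =
            cur.filter (fun l => decide (PySem.Str.strip l ≠ "")) ++ [l] := by
          simp [List.filter_append, h2]
        rw [← hf]; exact ih (cur ++ [l])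
      · rw [if_neg (by simp [h2])]
        have hf : (cur ++ [l]).filter (fun l => decide (PySem.Str.strip l ≠ "")) =
            cur.filter (fun l => decide (PySem.Str.strip l ≠ "")) := by
          simp [List.filter_append, h2]
        rw [← hf]; exact ih (cur ++ [l])

theorem pvPre (ls : List String) : ∀ (pre : List String),
    pvTailA [] false ls = ((pvGather pre ls).drop 1).flatMap pvEmit := by
  induction ls with
  | nil => intro pre; simp [pvGather, pvTailA]
  | cons l ls ih =>
    intro pre
    by_cases h : PySem.Str.startswith l "### Chunk"
    · rw [pvTailA, if_pos h, pvGather, if_pos h]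
      simp only [List.drop_succ_cons, List.drop_zero]
      have := pvMain ls []
      simp only [List.filter_nil] at this
      simpa using this
    · rw [pvTailA, if_neg h, pvGather, if_neg h, if_neg (by simp)]
      exact ih (pre ++ [l])

theorem pvProcB (secs : List (List String)) : ∀ (init : List String),
    secs.foldl
      (fun chunks sec =>
        let filtered := sec.filter (fun l => decide (PySem.Str.strip l ≠ ""))
        if filtered ≠ [] then chunks ++ [PySem.Str.strip (PySem.Str.join "\n" filtered)] else chunks)
      init = init ++ secs.flatMap pvEmit := by
  induction secs with
  | nil => intro init; simp
  | cons sec secs ih =>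
    intro init
    simp only [List.foldl_cons, List.flatMap_cons, pvEmit]
    rw [ih]
    split <;> simp

-- ===== VERDICT (by name: the statement is the Claim_ definition above) =====
theorem extract_chunks_from_markdown_py_spec : Claim_equal_extract_chunks_from_markdown_py := by
  intro content _
  show extract_chunks_from_markdown_py content = extract_chunks_from_markdown_py_alt content
  have hA : extract_chunks_from_markdown_py content =
      pyAFin (((PySem.Str.split? content "\n").getD []).foldl pyAStep ([], [], false)) := rfl
  have hB : extract_chunks_from_markdown_py_alt content =
      (((((PySem.Str.split? content "\n").getD []).foldl pyBStep [[]]).drop 1).foldl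
        (fun chunks sec =>
          let filtered := sec.filter (fun l => decide (PySem.Str.strip l ≠ ""))
          if filtered ≠ [] then chunks ++ [PySem.Str.strip (PySem.Str.join "\n" filtered)]
          else chunks) []) := rfl
  rw [hA, hB, pvA_fold, show ([[]] : List (List String)) = [] ++ [([] : List String)] from rfl,
    pvB_fold, pvProcB]
  simp only [List.nil_append]
  exact pvPre _ []
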